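-- pv_equiv track=rewrite | github.com/jnemec91/aoc | AOC2024/7/bridge_repair.py | _get_all_possible_strings
-- ===== SOURCE A (Python) =====
-- from itertools import product
--
-- def _get_all_possible_strings(numbers, part_two=False):
--     if part_two:
--         operators = ['+', '*', '||']
--     else:
--         operators = ['+', '*']
--
--     all_possible_strings = []
--
--     for ops in product(operators, repeat=len(numbers)-1):
--         string = numbers[0]
--         for num, op in zip(numbers[1:], ops):
--             string += op + num
--         all_possible_strings.append(string)
--
--     return all_possible_strings
-- ===== SOURCE B (Python) =====
-- def _get_all_possible_strings(numbers, part_two=False):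
--     operators = ['+', '*', '||'] if part_two else ['+', '*']
--     results = []
--
--     def go(prefix, i):
--         if i == len(numbers):
--             results.append(prefix)
--         else:
--             for op in operators:
--                 go(prefix + op + numbers[i], i + 1)
--
--     go(numbers[0], 1)
--     return results
-- ===== Notes on version B (the rewrite author's own statement) =====
-- stated objective: alternative
-- what changed: B builds each string by direct recursion on the remaining numbers with a growing prefix (rightmost operator varying fastest), instead of materialising all operator tuples with itertools.product and re-folding each tuple over the list.
import Mathlib
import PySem

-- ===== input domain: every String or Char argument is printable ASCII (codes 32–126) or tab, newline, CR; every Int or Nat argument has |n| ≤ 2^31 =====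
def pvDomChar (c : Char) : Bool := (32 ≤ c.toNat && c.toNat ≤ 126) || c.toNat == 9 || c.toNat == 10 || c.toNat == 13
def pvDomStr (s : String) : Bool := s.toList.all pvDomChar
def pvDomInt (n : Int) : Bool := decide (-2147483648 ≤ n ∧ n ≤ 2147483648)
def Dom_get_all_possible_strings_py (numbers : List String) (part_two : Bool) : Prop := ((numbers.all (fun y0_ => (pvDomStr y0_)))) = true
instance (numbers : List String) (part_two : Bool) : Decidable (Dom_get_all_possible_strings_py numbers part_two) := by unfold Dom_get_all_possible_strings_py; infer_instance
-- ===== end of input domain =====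

-- B replaces itertools.product + per-tuple refolding by a direct recursion with a growing pfx (alternative decomposition, same cost).


-- ===== PORT A =====
-- itertools.product(operators, repeat=k): leftmost component varies slowest, exactly this recursion
def pvProdRep (ops : List String) : Nat → List (List String)
  | 0 => [[]]
  | k + 1 => ops.flatMap (fun x => (pvProdRep ops k).map (fun t => x :: t))

def get_all_possible_strings_py (numbers : List String) (part_two : Bool) : List String :=
  let operators := if part_two then ["+", "*", "||"] else ["+", "*"]
  match numbers with
  | [] => []   -- Python raises ValueError here; excluded by Pre_
  | n0 :: rest =>
    (pvProdRep operators rest.length).foldl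
      (fun acc ops =>
        acc ++ [(rest.zip ops).foldl (fun s p => s ++ p.2 ++ p.1) n0]) []

-- ===== PORT B =====
def pvGo (operators : List String) (pfx : String) : List String → List String
  | [] => [pfx]
  | n :: rs => operators.flatMap (fun op => pvGo operators (pfx ++ op ++ n) rs)

def get_all_possible_strings_py_alt (numbers : List String) (part_two : Bool) : List String :=
  let operators := if part_two then ["+", "*", "||"] else ["+", "*"]
  match numbers with
  | [] => []   -- Python B raises IndexError here; excluded by Pre_
  | n0 :: rest => pvGo operators n0 rest

-- ===== PRECONDITION & SPEC =====
-- Pre_ excludes only the empty list, on which A raises ValueError (product repeat=-1) and B raises IndexError.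
def Pre_get_all_possible_strings_py (numbers : List String) (part_two : Bool) : Prop := numbers ≠ []
instance (numbers : List String) (part_two : Bool) : Decidable (Pre_get_all_possible_strings_py numbers part_two) := by unfold Pre_get_all_possible_strings_py; infer_instance
def pvWitness_get_all_possible_strings_py : List String × Bool := (["1", "2"], false)

def Spec_get_all_possible_strings_py (numbers : List String) (part_two : Bool) (out : List String) : Prop := out = get_all_possible_strings_py_alt numbers part_two
instance (numbers : List String) (part_two : Bool) (out : List String) : Decidable (Spec_get_all_possible_strings_py numbers part_two out) := by unfold Spec_get_all_possible_strings_py; infer_instance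

-- ===== CLAIM (what is proved, stated in full; the proofs are below) =====
def Claim_equal_get_all_possible_strings_py : Prop := ∀ (numbers : List String) (part_two : Bool), Dom_get_all_possible_strings_py numbers part_two → Pre_get_all_possible_strings_py numbers part_two → Spec_get_all_possible_strings_py numbers part_two (get_all_possible_strings_py numbers part_two)

-- ===== LEMMAS AND PROOFS =====

theorem pvGo_eq (ops : List String) (rest : List String) :
    ∀ pfx : String,
      pvGo ops pfx rest =
        (pvProdRep ops rest.length).map
          (fun t => (rest.zip t).foldl (fun s p => s ++ p.2 ++ p.1) pfx) := by
  induction rest with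
  | nil => intro pfx; simp [pvGo, pvProdRep]
  | cons n rs ih =>
    intro pfx
    simp only [pvGo, List.length_cons, pvProdRep, List.map_flatMap, List.map_map]
    refine List.flatMap_congr ?_
    intro op _
    rw [ih]
    rfl

theorem foldl_append_singleton {α β : Type} (f : α → β) (l : List α) :
    ∀ acc : List β, l.foldl (fun acc x => acc ++ [f x]) acc = acc ++ l.map f := by
  induction l with
  | nil => intro acc; simp
  | cons x xs ih => intro acc; simp [List.foldl, ih]

-- ===== VERDICT (by name: the statement is the Claim_ definition above) =====
theorem get_all_possible_strings_py_spec : Claim_equal_get_all_possible_strings_py := by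
  intro numbers part_two _ hpre
  unfold Spec_get_all_possible_strings_py get_all_possible_strings_py get_all_possible_strings_py_alt
  cases numbers with
  | nil => exact absurd rfl hpre
  | cons n0 rest =>
    simp only
    rw [foldl_append_singleton, pvGo_eq]
    simp
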